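-- pv_equiv track=rewrite | github.com/kna163/partitions | src/partitions/parti.py | ref_idx
-- ===== SOURCE A (Python) =====
-- Seq = list[int]
--
-- def ref_idx(seq : Seq) -> int:
--     zs = seq.count(0)
--     c = 0
--     for i,b in enumerate(seq):
--         if zs == c:
--             return i
--         if b == 0:
--             zs -= 1
--         else:
--             c += 1
--     return 0
-- ===== SOURCE B (Python) =====
-- Seq = list[int]
--
-- def ref_idx(seq : Seq) -> int:
--     # closed form: at index i the loop's zeros-remaining minus ones-seen equals count(0) - i,
--     # so A returns the first i with i == count(0), falling through to 0 when none exists.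
--     z = seq.count(0)
--     return z if z < len(seq) else 0
-- ===== Notes on version B (the rewrite author's own statement) =====
-- stated objective: simpler
-- what changed: Replaced the per-element state loop (zeros-remaining / ones-seen counters with an early return) by the closed form: the loop condition first holds exactly at index count(0), so B returns seq.count(0) if it is a valid index, else 0.
import Mathlib
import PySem

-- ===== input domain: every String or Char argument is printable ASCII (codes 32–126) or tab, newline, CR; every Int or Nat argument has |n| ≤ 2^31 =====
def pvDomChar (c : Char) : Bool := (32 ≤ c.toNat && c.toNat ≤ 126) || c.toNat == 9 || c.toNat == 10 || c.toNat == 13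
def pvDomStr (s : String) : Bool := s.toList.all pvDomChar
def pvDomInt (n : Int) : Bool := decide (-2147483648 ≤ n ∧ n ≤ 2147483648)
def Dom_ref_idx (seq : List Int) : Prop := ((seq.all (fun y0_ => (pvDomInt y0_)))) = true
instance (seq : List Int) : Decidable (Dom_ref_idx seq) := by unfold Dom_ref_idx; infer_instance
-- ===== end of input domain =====

-- ===== PORT A =====
def refIdxLoop : List Int → Int → Int → Int → Int
  | [], _, _, _ => 0
  | b :: rest, zs, c, i =>
    if zs = c then i
    else if b = 0 then refIdxLoop rest (zs - 1) c (i + 1)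
    else refIdxLoop rest zs (c + 1) (i + 1)

def ref_idx (seq : List Int) : Int :=
  refIdxLoop seq ((PySem.List.count seq 0 : Nat) : Int) 0 0

-- ===== PORT B =====
-- B: closed form — return count(0) when it is a valid index, else 0
def ref_idx_alt (seq : List Int) : Int :=
  let z : Int := ((PySem.List.count seq 0 : Nat) : Int)
  if z < (seq.length : Int) then z else 0

-- ===== PRECONDITION & SPEC =====
def Spec_ref_idx (seq : List Int) (out : Int) : Prop := out = ref_idx_alt seq
instance (seq : List Int) (out : Int) : Decidable (Spec_ref_idx seq out) := by unfold Spec_ref_idx; infer_instance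

-- ===== CLAIM (what is proved, stated in full; the proofs are below) =====
def Claim_equal_ref_idx : Prop := ∀ (seq : List Int), Dom_ref_idx seq → Spec_ref_idx seq (ref_idx seq)

-- ===== LEMMAS AND PROOFS =====
-- Each loop step decreases zs - c by exactly 1, so the loop returns the first index
-- i + (zs - c) when 0 ≤ zs - c < |rest|, and falls through to 0 otherwise.
theorem refIdxLoop_eq (rest : List Int) : ∀ (zs c i : Int),
    refIdxLoop rest zs c i =
      if 0 ≤ zs - c ∧ zs - c < (rest.length : Int) then i + (zs - c) else 0 := by
  induction rest with
  | nil => intro zs c i; simp [refIdxLoop]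
  | cons b t ih =>
    intro zs c i
    simp only [refIdxLoop, List.length_cons]
    by_cases h : zs = c
    · subst h; simp
    · rw [if_neg h]
      by_cases hb : b = 0
      · rw [if_pos hb, ih]; split_ifs <;> push_cast at * <;> omega
      · rw [if_neg hb, ih]; split_ifs <;> push_cast at * <;> omega

-- ===== VERDICT (by name: the statement is the Claim_ definition above) =====
theorem ref_idx_spec : Claim_equal_ref_idx := by
  intro seq _
  unfold Spec_ref_idx ref_idx ref_idx_alt
  rw [refIdxLoop_eq]
  have hle : PySem.List.count seq 0 ≤ seq.length := by
    simp [PySem.List.count]; exact List.count_le_length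
  split_ifs <;> push_cast at * <;> omega
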